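-- pv_equiv track=rewrite | github.com/nii-yamagishilab/project-CURRENNT-public | pyTools/pyAlg/confuseMatrix.py | MakeIndx
-- ===== SOURCE A (Python) =====
-- def MakeIndx(ix1, ix2):
--     """ [0,1,3] [4,5,6]
--     ==> [0,0,0,1,1,1,3,3,3][4,5,6,4,5,6,4,5,6]
--     """
--     ou1 = []
--     ou2 = []
--     for id1, idx1 in enumerate(ix1):
--         for id2, idx2 in enumerate(ix2):
--             ou1.append(idx1)
--             ou2.append(idx2)
--     return ou1, ou2
-- ===== SOURCE B (Python) =====
-- def MakeIndx(ix1, ix2):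
--     ix1 = list(ix1)
--     ix2 = list(ix2)
--     m = len(ix2)
--     total = len(ix1) * m
--     ou1 = [ix1[k // m] for k in range(total)]
--     ou2 = [ix2[k % m] for k in range(total)]
--     return ou1, ou2
-- ===== Notes on version B (the rewrite author's own statement) =====
-- stated objective: alternative
-- what changed: Replaces A's nested append loops over both lists with flat-index arithmetic: a single range over n*m positions, recovering each output element by divmod on the flat index (ou1[k]=ix1[k//m], ou2[k]=ix2[k%m]).
import Mathlib
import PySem

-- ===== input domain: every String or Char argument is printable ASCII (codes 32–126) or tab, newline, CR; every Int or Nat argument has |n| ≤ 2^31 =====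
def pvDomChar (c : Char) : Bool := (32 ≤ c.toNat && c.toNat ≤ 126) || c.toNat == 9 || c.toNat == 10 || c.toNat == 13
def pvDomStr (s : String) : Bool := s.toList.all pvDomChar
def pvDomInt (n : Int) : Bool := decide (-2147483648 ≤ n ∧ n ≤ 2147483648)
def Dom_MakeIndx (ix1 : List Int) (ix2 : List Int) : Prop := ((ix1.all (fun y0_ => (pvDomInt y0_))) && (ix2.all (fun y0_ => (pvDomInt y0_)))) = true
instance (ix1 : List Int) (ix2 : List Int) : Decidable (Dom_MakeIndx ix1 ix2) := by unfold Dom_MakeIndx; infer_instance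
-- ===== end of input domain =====

-- B recovers both outputs by flat-index divmod arithmetic over one range of n*m
-- positions instead of A's nested append loops; objective: alternative.

-- ===== PORT A =====
-- nested for-loops appending (idx1, idx2) pairwise into the accumulators ou1, ou2
def MakeIndx (ix1 : List Int) (ix2 : List Int) : List Int × List Int :=
  ix1.foldl (fun st idx1 =>
    ix2.foldl (fun st2 idx2 => (st2.1 ++ [idx1], st2.2 ++ [idx2])) st)
    ([], [])

-- ===== PORT B =====
-- ou1 = [ix1[k // m] for k in range(total)], ou2 = [ix2[k % m] for k in range(total)];
-- the indices k // m and k % m are always in range, so pyGetD with default 0 is exact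
def MakeIndx_alt (ix1 : List Int) (ix2 : List Int) : List Int × List Int :=
  let m : Int := ix2.length
  let total : Int := (ix1.length : Int) * m
  ((PySem.List.pyRange 0 total 1).map
      (fun k => PySem.List.pyGetD ix1 (PySem.Int.floordiv k m) 0),
   (PySem.List.pyRange 0 total 1).map
      (fun k => PySem.List.pyGetD ix2 (PySem.Int.mod k m) 0))

-- ===== PRECONDITION & SPEC =====
def Spec_MakeIndx (ix1 : List Int) (ix2 : List Int) (out : List Int × List Int) : Prop := out = MakeIndx_alt ix1 ix2
instance (ix1 : List Int) (ix2 : List Int) (out : List Int × List Int) : Decidable (Spec_MakeIndx ix1 ix2 out) := by unfold Spec_MakeIndx; infer_instance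

-- ===== CLAIM (what is proved, stated in full; the proofs are below) =====
def Claim_equal_MakeIndx : Prop := ∀ (ix1 : List Int) (ix2 : List Int), Dom_MakeIndx ix1 ix2 → Spec_MakeIndx ix1 ix2 (MakeIndx ix1 ix2)

-- ===== LEMMAS AND PROOFS =====

-- A's inner loop appends x |ix2| times to the first accumulator and ix2 to the second
theorem makeIndx_inner (ix2 : List Int) (x : Int) (a b : List Int) :
    ix2.foldl (fun st2 idx2 => (st2.1 ++ [x], st2.2 ++ [idx2])) (a, b)
      = (a ++ List.replicate ix2.length x, b ++ ix2) := by
  induction ix2 generalizing a b with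
  | nil => simp
  | cons y ys ih =>
    simp only [List.foldl_cons, ih, List.length_cons]
    simp [List.replicate_succ]

-- closed form of A's whole fold
theorem makeIndx_outer (ix1 ix2 : List Int) (a b : List Int) :
    ix1.foldl (fun st idx1 =>
        ix2.foldl (fun st2 idx2 => (st2.1 ++ [idx1], st2.2 ++ [idx2])) st) (a, b)
      = (a ++ ix1.flatMap (fun x => List.replicate ix2.length x),
         b ++ (List.replicate ix1.length ix2).flatten) := by
  induction ix1 generalizing a b with
  | nil => simp
  | cons x xs ih =>
    simp only [List.foldl_cons, makeIndx_inner, ih]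
    simp [List.replicate_succ]

-- B's first comprehension over Nat indices equals the repeat-each closed form
theorem b_fst_nat (ix1 : List Int) (m : Nat) :
    (List.range (ix1.length * m)).map (fun k => ix1.getD (k / m) 0)
      = ix1.flatMap (fun x => List.replicate m x) := by
  induction ix1 with
  | nil => simp
  | cons x xs ih =>
    have h : (x :: xs).length * m = m + xs.length * m := by
      simp [List.length_cons]; ring
    rw [h, List.range_add, List.map_append, List.map_map]
    congr 1
    · refine List.eq_replicate_iff.mpr ⟨by simp, ?_⟩
      intro b hb
      obtain ⟨k, hk, rfl⟩ := List.mem_map.mp hb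
      rw [List.mem_range] at hk
      simp [Nat.div_eq_of_lt hk]
    · calc List.map ((fun k => (x :: xs).getD (k / m) 0) ∘ fun y => m + y)
            (List.range (xs.length * m))
          = List.map (fun k => xs.getD (k / m) 0) (List.range (xs.length * m)) :=
            List.map_congr_left (fun k hk => by
              rw [List.mem_range] at hk
              have hm : 0 < m := Nat.pos_of_ne_zero (by rintro rfl; simp at hk)
              show (x :: xs).getD ((m + k) / m) 0 = xs.getD (k / m) 0
              rw [Nat.add_comm, Nat.add_div_right _ hm]
              simp)
        _ = (List.map (fun y => List.replicate m y) xs).flatten := by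
            rw [ih]; simp [List.flatMap_def]

-- B's second comprehension over Nat indices equals the cycled closed form
theorem b_snd_nat (ix2 : List Int) (n : Nat) :
    (List.range (n * ix2.length)).map (fun k => ix2.getD (k % ix2.length) 0)
      = (List.replicate n ix2).flatten := by
  induction n with
  | zero => simp
  | succ n ih =>
    have h : (n + 1) * ix2.length = ix2.length + n * ix2.length := by ring
    rw [h, List.range_add, List.map_append, List.map_map,
        List.replicate_succ, List.flatten_cons]
    congr 1
    · apply List.ext_getElem
      · simp
      · intro i h1 h2
        simp only [List.getElem_map, List.getElem_range]
        rw [Nat.mod_eq_of_lt h2]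
        exact List.getD_eq_getElem _ _ h2
    · calc List.map ((fun k => ix2.getD (k % ix2.length) 0) ∘ fun y => ix2.length + y)
            (List.range (n * ix2.length))
          = List.map (fun k => ix2.getD (k % ix2.length) 0) (List.range (n * ix2.length)) :=
            List.map_congr_left (fun k _ => by
              show ix2.getD ((ix2.length + k) % ix2.length) 0 = ix2.getD (k % ix2.length) 0
              rw [Nat.add_mod_left])
        _ = (List.replicate n ix2).flatten := ih

-- ===== VERDICT (by name: the statement is the Claim_ definition above) =====
theorem MakeIndx_spec : Claim_equal_MakeIndx := by
  intro ix1 ix2 _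
  show MakeIndx ix1 ix2 = MakeIndx_alt ix1 ix2
  rw [MakeIndx, makeIndx_outer]
  simp only [MakeIndx_alt]
  have hc : ((ix1.length : Int) * (ix2.length : Int))
      = ((ix1.length * ix2.length : Nat) : Int) := by push_cast; ring
  rw [hc, PySem.List.pyRange_zero_nat, List.map_map, List.map_map]
  simp only [List.nil_append]
  refine Prod.ext ?_ ?_
  · dsimp only
    rw [← b_fst_nat ix1 ix2.length]
    exact List.map_congr_left (fun k _ => by
      show ix1.getD (k / ix2.length) 0
          = PySem.List.pyGetD ix1 (PySem.Int.floordiv (k : Int) (ix2.length : Int)) 0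
      rw [PySem.Int.floordiv_natCast, PySem.List.pyGetD_natCast])
  · dsimp only
    rw [← b_snd_nat ix2 ix1.length]
    exact List.map_congr_left (fun k _ => by
      show ix2.getD (k % ix2.length) 0
          = PySem.List.pyGetD ix2 (PySem.Int.mod (k : Int) (ix2.length : Int)) 0
      rw [PySem.Int.mod_natCast, PySem.List.pyGetD_natCast])
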